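-- pv_equiv track=rewrite | github.com/shakti-bsat/shewell | main.py | is_pregnancy_related
-- ===== SOURCE A (Python) =====
-- def is_pregnancy_related(query):
--     keywords = [
--         "pregnancy", "pregnant", "postpartum", "post pregnancy",
--         "breastfeeding", "delivery", "labor", "trimester",
--         "fetus", "prenatal", "maternal", "miscarriage",
--         "c-section", "newborn", "baby"
--     ]
--
--     query_lower = query.lower()
--     return any(word in query_lower for word in keywords)
-- ===== SOURCE B (Python) =====
-- def is_pregnancy_related(query):
--     keywords = (
--         "pregnancy", "pregnant", "postpartum", "post pregnancy",
--         "breastfeeding", "delivery", "labor", "trimester",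
--         "fetus", "prenatal", "maternal", "miscarriage",
--         "c-section", "newborn", "baby"
--     )
--     q = query.lower()
--     # one left-to-right pass: at each position, test whether some keyword starts there
--     for i in range(len(q) + 1):
--         for w in keywords:
--             if q.startswith(w, i):
--                 return True
--     return False
-- ===== Notes on version B (the rewrite author's own statement) =====
-- stated objective: alternative
-- what changed: Replaces 15 separate substring scans ('word in query_lower' per keyword) with a single left-to-right pass over the lowercased query that at each position tests whether some keyword starts there.
import Mathlib
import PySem

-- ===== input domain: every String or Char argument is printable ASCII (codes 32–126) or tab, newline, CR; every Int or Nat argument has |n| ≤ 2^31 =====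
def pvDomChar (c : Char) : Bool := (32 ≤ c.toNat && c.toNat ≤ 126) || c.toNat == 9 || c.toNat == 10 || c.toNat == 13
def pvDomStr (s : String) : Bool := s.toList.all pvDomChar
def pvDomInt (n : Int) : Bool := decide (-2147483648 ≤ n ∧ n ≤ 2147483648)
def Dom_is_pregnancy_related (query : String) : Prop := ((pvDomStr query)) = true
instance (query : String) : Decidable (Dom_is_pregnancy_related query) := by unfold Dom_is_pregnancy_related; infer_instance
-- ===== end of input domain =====

-- B replaces per-keyword substring scans by one pass over positions testing each keyword as a prefix (alternative, same cost).

-- ===== PORT A =====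
def pregKeywords : List String :=
  ["pregnancy", "pregnant", "postpartum", "post pregnancy",
   "breastfeeding", "delivery", "labor", "trimester",
   "fetus", "prenatal", "maternal", "miscarriage",
   "c-section", "newborn", "baby"]

def is_pregnancy_related (query : String) : Bool :=
  let query_lower := PySem.Str.lower query
  pregKeywords.any (fun word => PySem.Str.isIn word query_lower)

-- ===== PORT B =====
-- one pass over the positions of the lowered query (i = 0 .. len), testing q.startswith(w, i)
def pregGo (kws : List String) : List Char → Bool
  | [] => kws.any (fun w => PySem.Chars.startswith [] w.toList)
  | c :: rest =>
      kws.any (fun w => PySem.Chars.startswith (c :: rest) w.toList) || pregGo kws rest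

def is_pregnancy_related_alt (query : String) : Bool :=
  pregGo pregKeywords (PySem.Str.lower query).toList

-- ===== PRECONDITION & SPEC =====
def Spec_is_pregnancy_related (query : String) (out : Bool) : Prop := out = is_pregnancy_related_alt query
instance (query : String) (out : Bool) : Decidable (Spec_is_pregnancy_related query out) := by unfold Spec_is_pregnancy_related; infer_instance

-- ===== CLAIM (what is proved, stated in full; the proofs are below) =====
def Claim_equal_is_pregnancy_related : Prop := ∀ (query : String), Dom_is_pregnancy_related query → Spec_is_pregnancy_related query (is_pregnancy_related query)

-- ===== LEMMAS AND PROOFS =====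

theorem pregGo_iff (kws : List String) (s : List Char) :
    pregGo kws s = true ↔ ∃ w ∈ kws, ∃ j, w.toList <+: s.drop j := by
  induction s with
  | nil =>
      simp [pregGo, PySem.Chars.startswith_iff]
  | cons c rest ih =>
      simp only [pregGo, Bool.or_eq_true, List.any_eq_true, PySem.Chars.startswith_iff, ih]
      constructor
      · rintro (⟨w, hw, hp⟩ | ⟨w, hw, j, hp⟩)
        · exact ⟨w, hw, 0, by simpa using hp⟩
        · exact ⟨w, hw, j + 1, by simpa using hp⟩
      · rintro ⟨w, hw, j, hp⟩
        cases j with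
        | zero => exact Or.inl ⟨w, hw, by simpa using hp⟩
        | succ j => exact Or.inr ⟨w, hw, j, by simpa using hp⟩

theorem is_pregnancy_related_eq (query : String) :
    is_pregnancy_related query = is_pregnancy_related_alt query := by
  rw [Bool.eq_iff_iff]
  simp only [is_pregnancy_related, is_pregnancy_related_alt, pregGo_iff,
    List.any_eq_true, PySem.Str.isIn_eq]
  constructor
  · rintro ⟨w, hw, h⟩
    exact ⟨w, hw, (PySem.Chars.exists_prefix_drop_iff_isIn _ _).mpr h⟩
  · rintro ⟨w, hw, j, hp⟩
    exact ⟨w, hw, (PySem.Chars.exists_prefix_drop_iff_isIn _ _).mp ⟨j, hp⟩⟩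

-- ===== VERDICT (by name: the statement is the Claim_ definition above) =====
theorem is_pregnancy_related_spec : Claim_equal_is_pregnancy_related := by
  intro query _
  exact is_pregnancy_related_eq query
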